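-- pv_equiv track=rewrite | github.com/hybug/RL_Lab | envs/env_instances/lord/sl_helper/sl_utils.py | rank_to_bool_str
-- ===== SOURCE A (Python) =====
-- def rank_to_bool_str(rank_list: list) -> str:
--     """Convert ranks of cards to 4 * 15 maps with boolean values.
--     Example:
--
--     :param rank_list: str: RJ 2 K K T 9 6 6 5 5 4 4 4 4 3 3 3 # 17
--     :return: str: 1 0 1 0 1 0 0 1 1 0 0 1 1 1 1
--                   0 0 0 0 1 0 0 0 0 0 0 1 1 1 1
--                   0 0 0 0 0 0 0 0 0 0 0 0 0 1 1
--                   0 0 0 0 0 0 0 0 0 0 0 0 0 1 0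
--
--     """
--     ranks = ['RJ', 'BJ', '2', 'A', 'K', 'Q', 'J',
--              'T', '9', '8', '7', '6', '5', '4', '3']
--     if not rank_list:
--         return '000000000000000000000000000000000000000000000000000000000000'
--     bool_str = ''
--     for _ in range(4):
--         rank_list_copy = rank_list.copy()
--         for rank in ranks:
--             if rank in rank_list_copy:
--                 bool_str += '1'
--                 rank_list.remove(rank)
--             else:
--                 bool_str += '0'
--
--     return bool_str
-- ===== SOURCE B (Python) =====
-- # B: one counting pass + a 60-cell comprehension instead of A's four copy/scan/remove passes.
-- # Note: A mutates rank_list in place (removes up to 4 occurrences of each valid rank); B does not.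
-- # The equivalence claimed is about the RETURN value only.
-- def rank_to_bool_str(rank_list: list) -> str:
--     ranks = ['RJ', 'BJ', '2', 'A', 'K', 'Q', 'J',
--              'T', '9', '8', '7', '6', '5', '4', '3']
--     counts = {}
--     for r in rank_list:
--         counts[r] = counts.get(r, 0) + 1
--     return ''.join('1' if counts.get(r, 0) > i else '0'
--                    for i in range(4) for r in ranks)
-- ===== Notes on version B (the rewrite author's own statement) =====
-- stated objective: faster
-- what changed: Replaced A's four mutating passes (each copying the list, scanning membership and calling remove) by one counting pass building a dict and a single 60-cell comprehension emitting '1' iff count(rank) > row; the empty-list special case disappears; B does not mutate rank_list (A does), return value only is matched.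
import Mathlib
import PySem

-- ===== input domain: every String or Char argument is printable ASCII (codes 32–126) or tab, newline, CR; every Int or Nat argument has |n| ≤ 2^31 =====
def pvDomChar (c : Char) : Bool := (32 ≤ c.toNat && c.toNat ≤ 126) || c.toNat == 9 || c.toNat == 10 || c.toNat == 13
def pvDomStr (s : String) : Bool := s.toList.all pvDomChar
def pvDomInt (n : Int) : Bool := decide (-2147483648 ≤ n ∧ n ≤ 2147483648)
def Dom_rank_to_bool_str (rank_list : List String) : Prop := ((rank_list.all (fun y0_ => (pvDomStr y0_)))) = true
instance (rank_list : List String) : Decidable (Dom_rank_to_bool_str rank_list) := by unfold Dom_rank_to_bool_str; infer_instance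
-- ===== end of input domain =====

-- B replaces A's four mutating copy/scan/remove passes by one counting pass and a 60-cell
-- column formula (simpler); A mutates rank_list in place, B does not: the equivalence proved
-- here is about the RETURN value only.

-- ===== PORT A =====
def ranksA : List String :=
  ["RJ", "BJ", "2", "A", "K", "Q", "J", "T", "9", "8", "7", "6", "5", "4", "3"]

-- one iteration of A's inner `for rank in ranks` loop; `copy` is rank_list.copy() made at row start.
-- The `.getD st.2` arm of remove? is unreachable: rank ∈ copy implies rank ∈ st.2 because the
-- distinct ranks are each removed at most once per row, so Python's remove never raises ValueError.
def rowStepA (copy : List String) (st : List Char × List String) (rank : String) :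
    List Char × List String :=
  if rank ∈ copy then (st.1 ++ ['1'], (PySem.List.remove? st.2 rank).getD st.2)
  else (st.1 ++ ['0'], st.2)

def rank_to_bool_str (rank_list : List String) : String :=
  if rank_list = [] then
    "000000000000000000000000000000000000000000000000000000000000"
  else
    String.mk
      ((PySem.List.pyRange 0 4 1).foldl
        (fun (st : List Char × List String) _ => ranksA.foldl (rowStepA st.2) st)
        ([], rank_list)).1

-- ===== PORT B =====
-- Source B's local `ranks` is the same literal list; the shared constant `ranksA` stands for both.
def rank_to_bool_str_alt (rank_list : List String) : String :=
  let counts : PySem.Dict String Int :=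
    rank_list.foldl (fun d r => d.insert r (d.getD r 0 + 1)) PySem.Dict.empty
  String.mk
    ((PySem.List.pyRange 0 4 1).foldl
      (fun cs i =>
        ranksA.foldl (fun cs r => cs ++ [if counts.getD r 0 > i then '1' else '0']) cs)
      [])

-- ===== PRECONDITION & SPEC =====
def Spec_rank_to_bool_str (rank_list : List String) (out : String) : Prop := out = rank_to_bool_str_alt rank_list
instance (rank_list : List String) (out : String) : Decidable (Spec_rank_to_bool_str rank_list out) := by unfold Spec_rank_to_bool_str; infer_instance

-- ===== CLAIM (what is proved, stated in full; the proofs are below) =====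
def Claim_equal_rank_to_bool_str : Prop := ∀ (rank_list : List String), Dom_rank_to_bool_str rank_list → Spec_rank_to_bool_str rank_list (rank_to_bool_str rank_list)

-- ===== LEMMAS AND PROOFS =====

-- canonical description of the output: row k emits '1' at rank r iff k < count(r)
def rowChars (l : List String) (k : Nat) : List Char :=
  ranksA.map (fun r => if k < l.count r then '1' else '0')

def rowsOut (l : List String) : Nat → Nat → List Char
  | _, 0 => []
  | k, n + 1 => rowChars l k ++ rowsOut l (k + 1) n

-- A's inner loop over a Nodup rank list: appends the membership row (w.r.t. the snapshot `copy`)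
-- and removes one occurrence of each rank present in `copy`.
lemma rowA_fold (rs : List String) (copy : List String) :
    rs.Nodup → ∀ (acc : List Char) (cur : List String),
    (∀ r ∈ rs, (r ∈ cur ↔ r ∈ copy)) →
    ∃ cur', rs.foldl (rowStepA copy) (acc, cur)
        = (acc ++ rs.map (fun r => if r ∈ copy then '1' else '0'), cur')
      ∧ ∀ r : String, cur'.count r = cur.count r - (if r ∈ rs ∧ r ∈ copy then 1 else 0) := by
  induction rs with
  | nil => intro _ acc cur _; exact ⟨cur, by simp, by simp⟩
  | cons r0 rest ih =>
    intro hnd acc cur hmem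
    have hnd' := hnd.of_cons
    have hr0rest : r0 ∉ rest := (List.nodup_cons.mp hnd).1
    by_cases h0 : r0 ∈ copy
    · have hcur0 : r0 ∈ cur := (hmem r0 (by simp)).mpr h0
      have hrm : PySem.List.remove? cur r0 = some (cur.erase r0) :=
        PySem.List.remove?_eq_some_erase cur r0 hcur0
      have hmem' : ∀ r ∈ rest, (r ∈ cur.erase r0 ↔ r ∈ copy) := by
        intro r hr
        have hne : r ≠ r0 := fun h => hr0rest (h ▸ hr)
        rw [List.mem_erase_of_ne hne]
        exact hmem r (by simp [hr])
      obtain ⟨cur', heq, hcnt⟩ := ih hnd' (acc ++ ['1']) (cur.erase r0) hmem'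
      refine ⟨cur', ?_, ?_⟩
      · simp only [List.foldl_cons, rowStepA, if_pos h0, hrm]
        simp [heq, if_pos h0]
      · intro r
        rw [hcnt r, List.count_erase]
        by_cases hr : r = r0
        · subst hr
          have : r ∉ rest := hr0rest
          simp [h0, this]
        · have hne : r0 ≠ r := fun h => hr h.symm
          by_cases hrr : r ∈ rest <;> by_cases hrc : r ∈ copy <;>
            simp [hrr, hrc, hr, hne, List.mem_cons]
    · have hcur0 : r0 ∉ cur := fun h => h0 ((hmem r0 (by simp)).mp h)
      obtain ⟨cur', heq, hcnt⟩ := ih hnd' (acc ++ ['0']) cur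
        (fun r hr => hmem r (by simp [hr]))
      refine ⟨cur', ?_, ?_⟩
      · simp only [List.foldl_cons, rowStepA, if_neg h0]
        simp [heq, if_neg h0]
      · intro r
        rw [hcnt r]
        by_cases hr : r = r0
        · subst hr; simp [h0]
        · by_cases hrr : r ∈ rest <;> by_cases hrc : r ∈ copy <;>
            simp [hrr, hrc, hr, List.mem_cons]

lemma ranksA_nodup : ranksA.Nodup := by decide

-- A's outer loop: n rows starting from a live list whose counts are l's counts minus k on ranksA
lemma rowsA_fold (is : List Int) : ∀ (k : Nat) (acc : List Char) (live : List String)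
    (l : List String),
    (∀ r : String, live.count r = if r ∈ ranksA then l.count r - k else l.count r) →
    (is.foldl (fun (st : List Char × List String) _ => ranksA.foldl (rowStepA st.2) st)
        (acc, live)).1
      = acc ++ rowsOut l k is.length := by
  induction is with
  | nil => intro k acc live l _; simp [rowsOut]
  | cons i rest ih =>
    intro k acc live l hlive
    obtain ⟨cur', heq, hcnt⟩ := rowA_fold ranksA live ranksA_nodup acc live
      (fun _ _ => Iff.rfl)
    simp only [List.foldl_cons, heq]
    have hmap : ranksA.map (fun r => if r ∈ live then '1' else '0') = rowChars l k := by
      apply List.map_congr_left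
      intro r hr
      have h1 : (r ∈ live) ↔ k < l.count r := by
        rw [← List.count_pos_iff, hlive r, if_pos hr]
        omega
      by_cases h : r ∈ live
      · rw [if_pos h, if_pos (h1.mp h)]
      · rw [if_neg h, if_neg (fun hk => h (h1.mpr hk))]
    have hlive' : ∀ r : String, cur'.count r
        = if r ∈ ranksA then l.count r - (k + 1) else l.count r := by
      intro r
      rw [hcnt r, hlive r]
      by_cases hr : r ∈ ranksA
      · by_cases h : r ∈ live
        · have : 0 < live.count r := List.count_pos_iff.mpr h
          rw [hlive r, if_pos hr] at this
          simp [hr, h]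
          omega
        · have : live.count r = 0 := List.count_eq_zero.mpr h
          rw [hlive r, if_pos hr] at this
          simp [hr, h]
          omega
      · simp [hr]
    rw [hmap, ih (k + 1) (acc ++ rowChars l k) cur' l hlive']
    simp [rowsOut]

-- B's output is the same canonical rows, for every input
lemma alt_eq_rows (l : List String) :
    rank_to_bool_str_alt l = String.mk (rowsOut l 0 4) := by
  unfold rank_to_bool_str_alt
  have hc : ∀ r : String,
      (l.foldl (fun d r => d.insert r (d.getD r 0 + 1)) PySem.Dict.empty).getD r 0
        = (l.count r : Int) := by
    intro r
    rw [PySem.Dict.foldl_insert_getD_add_one_eq_counter, PySem.Dict.getD_counter]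
  simp only [hc]
  have hrange : PySem.List.pyRange 0 4 1 = [0, 1, 2, 3] := by decide
  rw [hrange]
  simp only [List.foldl_cons, List.foldl_nil, PySem.List.foldl_append_singleton_eq_map]
  have hrow : ∀ k : Nat,
      ranksA.map (fun r => if (l.count r : Int) > (k : Int) then '1' else '0')
        = rowChars l k := by
    intro k
    rw [rowChars]
    apply List.map_congr_left
    intro r _
    simp only [gt_iff_lt, Nat.cast_lt]
  have h0 := hrow 0; have h1 := hrow 1; have h2 := hrow 2; have h3 := hrow 3
  push_cast at h0 h1 h2 h3
  rw [h0, h1, h2, h3]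
  simp [rowsOut]

lemma a_eq_rows (l : List String) (h : l ≠ []) :
    rank_to_bool_str l = String.mk (rowsOut l 0 4) := by
  unfold rank_to_bool_str
  rw [if_neg h]
  have hrange : PySem.List.pyRange 0 4 1 = [0, 1, 2, 3] := by decide
  rw [hrange, rowsA_fold [0, 1, 2, 3] 0 [] l l (by intro r; simp)]
  simp

-- ===== VERDICT (by name: the statement is the Claim_ definition above) =====
theorem rank_to_bool_str_spec : Claim_equal_rank_to_bool_str := by
  intro rank_list _
  unfold Spec_rank_to_bool_str
  by_cases h : rank_list = []
  · subst h; decide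
  · rw [a_eq_rows rank_list h, alt_eq_rows rank_list]
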